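-- pv_equiv track=rewrite | github.com/VOYAGERX013/uber-hackathon | backend/questgen/modules/mcq_gen.py | prune_options
-- ===== SOURCE A (Python) =====
-- def prune_options(options, extra_options):
--     combined_options = options[0:4]
--     for extra_option in extra_options:
--         if len(combined_options) < 4:
--             combined_options.append(extra_option)
--         else:
--             break
--
--     return combined_options
-- ===== SOURCE B (Python) =====
-- def prune_options(options, extra_options):
--     return (list(options[:4]) + list(extra_options))[:4]
-- ===== Notes on version B (the rewrite author's own statement) =====
-- stated objective: simpler
-- what changed: Replaced the append loop with early break by a single closed-form expression: concatenate the capped head with the extras and slice the first four.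
import Mathlib
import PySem

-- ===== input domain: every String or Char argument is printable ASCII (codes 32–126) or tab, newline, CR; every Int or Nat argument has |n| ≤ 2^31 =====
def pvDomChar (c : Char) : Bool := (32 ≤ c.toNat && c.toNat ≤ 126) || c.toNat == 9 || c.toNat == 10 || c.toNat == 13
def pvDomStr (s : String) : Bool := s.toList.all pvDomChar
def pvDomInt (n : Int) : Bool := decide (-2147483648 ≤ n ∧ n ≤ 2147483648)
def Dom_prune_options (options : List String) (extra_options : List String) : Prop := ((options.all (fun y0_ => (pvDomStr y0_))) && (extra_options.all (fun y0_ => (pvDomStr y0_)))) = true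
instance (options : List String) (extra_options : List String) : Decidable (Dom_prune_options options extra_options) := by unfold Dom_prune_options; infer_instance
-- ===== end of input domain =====

-- B replaces A's append-with-break loop by a single closed-form expression (concatenate capped head with extras, slice to four); objective: simpler.


-- ===== PORT A =====
-- Port of A: take options[0:4], then loop over extras appending while length < 4, else break.
def pruneLoopA (combined : List String) (extras : List String) : List String :=
  match extras with
  | [] => combined
  | e :: rest =>
      if combined.length < 4 then pruneLoopA (combined ++ [e]) rest
      else combined

def prune_options (options : List String) (extra_options : List String) : List String :=
  pruneLoopA (PySem.List.slice options (some 0) (some 4)) extra_options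

-- ===== PORT B =====
-- Port of B: one closed-form expression, concatenate then slice to four.
def prune_options_alt (options : List String) (extra_options : List String) : List String :=
  PySem.List.slice (PySem.List.slice options (some 0) (some 4) ++ extra_options) (some 0) (some 4)

-- ===== PRECONDITION & SPEC =====
def Spec_prune_options (options : List String) (extra_options : List String) (out : List String) : Prop := out = prune_options_alt options extra_options
instance (options : List String) (extra_options : List String) (out : List String) : Decidable (Spec_prune_options options extra_options out) := by unfold Spec_prune_options; infer_instance

-- ===== CLAIM (what is proved, stated in full; the proofs are below) =====
def Claim_equal_prune_options : Prop := ∀ (options : List String) (extra_options : List String), Dom_prune_options options extra_options → Spec_prune_options options extra_options (prune_options options extra_options)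

-- ===== LEMMAS AND PROOFS =====

-- ===== VERDICT (by name: the statement is the Claim_ definition above) =====
-- Loop characterisation: appending while length < 4 equals take-to-4 of the concatenation,
-- provided the accumulator already has length ≤ 4.
theorem pruneLoopA_eq (c : List String) (e : List String) (h : c.length ≤ 4) :
    pruneLoopA c e = (c ++ e).take 4 := by
  induction e generalizing c with
  | nil => simp [pruneLoopA, List.take_of_length_le h]
  | cons x rest ih =>
      unfold pruneLoopA
      by_cases hlt : c.length < 4
      · simp only [hlt, if_pos]
        rw [ih (c ++ [x]) (by simp; omega)]
        simp
      · simp only [hlt, if_neg, not_false_iff]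
        have hc : c.length = 4 := by omega
        rw [List.take_append_of_le_length (by omega), List.take_of_length_le h]

theorem slice04_eq_take (l : List String) : PySem.List.slice l (some 0) (some 4) = l.take 4 := by
  have h : PySem.List.slice l none (some ((4:Nat):Int)) = l.take 4 := PySem.List.slice_to_natCast l 4
  simpa using h

theorem prune_options_spec : Claim_equal_prune_options := by
  intro options extra_options _
  unfold Spec_prune_options prune_options prune_options_alt
  rw [slice04_eq_take, slice04_eq_take,
    pruneLoopA_eq _ _ (by simp)]
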